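-- pv_equiv track=rewrite | github.com/Genidiot/ChipViewEnhance | src/Draw/calculate_line.py | calculate_physical_distances
-- ===== SOURCE A (Python) =====
-- def calculate_physical_distances(units, direction='x'):
--     distances = []
--     for i in range(len(units) - 1):
--         if direction == 'x':
--             distances.append(units[i+1][0] - units[i][0])
--         elif direction == 'y':
--             distances.append(units[i+1][1] - units[i][1])
--     return distances
-- ===== SOURCE B (Python) =====
-- def _diffs_dc(xs, idx):
--     # divide and conquer: split at the midpoint, recurse on the two halves
--     # sharing the boundary unit, concatenate; adjacent pairs are partitioned
--     # exactly between the halves, so the result is the adjacent differences.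
--     n = len(xs)
--     if n < 2:
--         return []
--     if n == 2:
--         return [xs[1][idx] - xs[0][idx]]
--     mid = n // 2
--     return _diffs_dc(xs[:mid + 1], idx) + _diffs_dc(xs[mid:], idx)
--
-- def calculate_physical_distances(units, direction='x'):
--     if direction == 'x':
--         return _diffs_dc(units, 0)
--     if direction == 'y':
--         return _diffs_dc(units, 1)
--     return []
-- ===== Notes on version B (the rewrite author's own statement) =====
-- stated objective: alternative
-- what changed: A's single index loop testing the direction string each iteration is replaced by resolving the axis once and computing the adjacent differences by divide and conquer: split the list at the midpoint, recurse on the two halves sharing the boundary unit, and concatenate.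
import Mathlib
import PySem

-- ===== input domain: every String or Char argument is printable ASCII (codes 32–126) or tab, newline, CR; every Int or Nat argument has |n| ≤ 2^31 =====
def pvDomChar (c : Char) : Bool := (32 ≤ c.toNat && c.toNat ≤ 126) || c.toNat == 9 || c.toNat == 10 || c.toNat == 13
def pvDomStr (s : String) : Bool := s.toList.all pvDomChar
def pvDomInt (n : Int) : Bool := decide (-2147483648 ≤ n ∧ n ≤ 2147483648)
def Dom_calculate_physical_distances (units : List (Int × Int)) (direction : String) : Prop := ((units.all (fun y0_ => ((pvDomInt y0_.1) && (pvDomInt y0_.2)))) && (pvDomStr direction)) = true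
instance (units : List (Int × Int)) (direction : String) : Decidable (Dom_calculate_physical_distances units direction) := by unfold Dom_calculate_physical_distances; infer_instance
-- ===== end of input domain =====

-- B resolves the axis once and computes the adjacent differences by divide and conquer
-- (split at the midpoint, halves share the boundary unit, concatenate), instead of A's
-- single index loop that re-tests the direction string on every iteration.

-- ===== PORT A =====
def calculate_physical_distances (units : List (Int × Int)) (direction : String) : List Int :=
  (PySem.List.pyRange 0 ((units.length : Int) - 1) 1).foldl
    (fun distances i =>
      if direction = "x" then
        distances ++ [(PySem.List.pyGetD units (i + 1) (0, 0)).1 - (PySem.List.pyGetD units i (0, 0)).1]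
      else if direction = "y" then
        distances ++ [(PySem.List.pyGetD units (i + 1) (0, 0)).2 - (PySem.List.pyGetD units i (0, 0)).2]
      else distances) []

-- ===== PORT B =====
-- tuple indexing u[idx] with idx ∈ {0, 1} (PySem has no tuple-index primitive; exact for idx = 0/1)
def pick (idx : Int) (u : Int × Int) : Int := if idx = 0 then u.1 else u.2

def diffsDc (xs : List (Int × Int)) (idx : Int) : List Int :=
  if xs.length < 2 then []
  else if xs.length = 2 then
    [pick idx (PySem.List.pyGetD xs 1 (0, 0)) - pick idx (PySem.List.pyGetD xs 0 (0, 0))]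
  else
    -- mid = len(xs) // 2, inlined
    diffsDc (PySem.List.slice xs none (some (((xs.length / 2 : ℕ) : Int) + 1))) idx ++
      diffsDc (PySem.List.slice xs (some ((xs.length / 2 : ℕ) : Int)) none) idx
termination_by xs.length
decreasing_by
  · have e1 : ((xs.length / 2 : ℕ) : Int) + 1 = ((xs.length / 2 + 1 : ℕ) : Int) := by omega
    rw [e1, PySem.List.slice_to_natCast, List.length_take]
    omega
  · rw [PySem.List.slice_from_natCast, List.length_drop]
    omega

def calculate_physical_distances_alt (units : List (Int × Int)) (direction : String) : List Int :=
  if direction = "x" then diffsDc units 0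
  else if direction = "y" then diffsDc units 1
  else []

-- ===== PRECONDITION & SPEC =====
def Spec_calculate_physical_distances (units : List (Int × Int)) (direction : String) (out : List Int) : Prop := out = calculate_physical_distances_alt units direction
instance (units : List (Int × Int)) (direction : String) (out : List Int) : Decidable (Spec_calculate_physical_distances units direction out) := by unfold Spec_calculate_physical_distances; infer_instance

-- ===== CLAIM (what is proved, stated in full; the proofs are below) =====
def Claim_equal_calculate_physical_distances : Prop := ∀ (units : List (Int × Int)) (direction : String), Dom_calculate_physical_distances units direction → Spec_calculate_physical_distances units direction (calculate_physical_distances units direction)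

-- ===== LEMMAS AND PROOFS =====

-- the adjacent differences of g over xs, the common characterisation of both ports
def dz (g : Int × Int → Int) (xs : List (Int × Int)) : List Int :=
  (xs.zip xs.tail).map (fun p => g p.2 - g p.1)

lemma getElem_dz (g : Int × Int → Int) (xs : List (Int × Int)) (k : ℕ)
    (hk : k < (dz g xs).length) (h1 : k + 1 < xs.length) (h0 : k < xs.length) :
    (dz g xs)[k] = g xs[k + 1] - g xs[k] := by
  simp [dz, List.getElem_zip, List.getElem_tail]

lemma dz_cons₂ (g : Int × Int → Int) (a b : Int × Int) (t : List (Int × Int)) :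
    dz g (a :: b :: t) = (g b - g a) :: dz g (b :: t) := by
  simp [dz]

-- splitting at any interior point m partitions the adjacent pairs
lemma dz_split (g : Int × Int → Int) :
    ∀ (m : ℕ) (xs : List (Int × Int)), 1 ≤ m → m < xs.length →
      dz g xs = dz g (xs.take (m + 1)) ++ dz g (xs.drop m) := by
  intro m
  induction m with
  | zero => intro xs h1 _; omega
  | succ m ih =>
    intro xs h1 h2
    cases xs with
    | nil => simp at h2
    | cons a rest =>
      cases rest with
      | nil => simp at h2
      | cons b t =>
        by_cases hm : m = 0
        · subst hm
          simp [dz]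
        · have hm1 : 1 ≤ m := by omega
          have hlt : m < (b :: t).length := by simp at h2 ⊢; omega
          have htk : (a :: b :: t).take (m + 1 + 1) = a :: (b :: t).take (m + 1) := rfl
          have htk2 : (b :: t).take (m + 1) = b :: t.take m := rfl
          have hdr : (a :: b :: t).drop (m + 1) = (b :: t).drop m := rfl
          rw [htk, htk2, hdr, dz_cons₂, dz_cons₂, ← htk2, ih (b :: t) hm1 hlt]
          simp

lemma diffsDc_eq (idx : Int) : ∀ (n : ℕ) (xs : List (Int × Int)), xs.length = n →
    diffsDc xs idx = dz (pick idx) xs := by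
  intro n
  induction n using Nat.strong_induction_on with
  | _ n ih =>
    intro xs hlen
    rw [diffsDc]
    by_cases hs : xs.length < 2
    · rw [if_pos hs]
      match xs, hs with
      | [], _ => rfl
      | [a], _ => rfl
    · rw [if_neg hs]
      by_cases h2 : xs.length = 2
      · rw [if_pos h2]
        match xs, h2 with
        | [a, b], _ =>
          simp [dz, PySem.List.pyGetD]
      · rw [if_neg h2]
        have hge : 3 ≤ xs.length := by omega
        have hm1 : 1 ≤ xs.length / 2 := by omega
        have hm2 : xs.length / 2 < xs.length := by omega
        have e1 : ((xs.length / 2 : ℕ) : Int) + 1 = ((xs.length / 2 + 1 : ℕ) : Int) := by omega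
        rw [e1, PySem.List.slice_to_natCast, PySem.List.slice_from_natCast]
        rw [ih (xs.take (xs.length / 2 + 1)).length (by rw [List.length_take]; omega) _ rfl,
          ih (xs.drop (xs.length / 2)).length (by rw [List.length_drop]; omega) _ rfl]
        exact (dz_split (pick idx) (xs.length / 2) xs hm1 hm2).symm

lemma foldl_const (l : List Int) (acc : List Int) :
    l.foldl (fun (d : List Int) (_ : Int) => d) acc = acc := by
  induction l generalizing acc with
  | nil => rfl
  | cons x t ih => exact ih acc

-- A's loop as adjacent differences of the chosen projection
lemma calcA_eq (g : Int × Int → Int) (units : List (Int × Int)) :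
    (PySem.List.pyRange 0 ((units.length : Int) - 1) 1).map
      (fun i => g (PySem.List.pyGetD units (i + 1) (0, 0)) - g (PySem.List.pyGetD units i (0, 0)))
    = dz g units := by
  apply List.ext_getElem
  · simp [dz, PySem.List.length_pyRange_one]
  · intro k h1 h2
    rw [List.length_map, PySem.List.length_pyRange_one] at h1
    have hk : k < units.length - 1 := by omega
    have hget : ∀ (m : ℕ) (hm : m < units.length),
        PySem.List.pyGetD units (m : Int) (0, 0) = units[m]'hm := by
      intro m hm
      rw [PySem.List.pyGetD_natCast]
      simp [hm]
    simp only [List.getElem_map, PySem.List.getElem_pyRange_one]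
    rw [getElem_dz _ _ _ h2 (by omega) (by omega)]
    have e1 : (0 : Int) + (k : Int) + 1 = ((k + 1 : ℕ) : Int) := by omega
    have e2 : (0 : Int) + (k : Int) = ((k : ℕ) : Int) := by omega
    rw [e1, e2, hget (k + 1) (by omega), hget k (by omega)]

lemma calc_x (units : List (Int × Int)) :
    calculate_physical_distances units "x" = dz Prod.fst units := by
  unfold calculate_physical_distances
  rw [show (fun (distances : List Int) (i : Int) =>
        if ("x" : String) = "x" then
          distances ++ [(PySem.List.pyGetD units (i + 1) (0, 0)).1 - (PySem.List.pyGetD units i (0, 0)).1]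
        else if ("x" : String) = "y" then
          distances ++ [(PySem.List.pyGetD units (i + 1) (0, 0)).2 - (PySem.List.pyGetD units i (0, 0)).2]
        else distances)
      = fun distances i =>
          distances ++ [(PySem.List.pyGetD units (i + 1) (0, 0)).1 - (PySem.List.pyGetD units i (0, 0)).1]
      from by funext d i; rw [if_pos rfl]]
  rw [PySem.List.foldl_append_singleton_eq_map]
  simpa using calcA_eq Prod.fst units

lemma calc_y (units : List (Int × Int)) :
    calculate_physical_distances units "y" = dz Prod.snd units := by
  unfold calculate_physical_distances
  rw [show (fun (distances : List Int) (i : Int) =>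
        if ("y" : String) = "x" then
          distances ++ [(PySem.List.pyGetD units (i + 1) (0, 0)).1 - (PySem.List.pyGetD units i (0, 0)).1]
        else if ("y" : String) = "y" then
          distances ++ [(PySem.List.pyGetD units (i + 1) (0, 0)).2 - (PySem.List.pyGetD units i (0, 0)).2]
        else distances)
      = fun distances i =>
          distances ++ [(PySem.List.pyGetD units (i + 1) (0, 0)).2 - (PySem.List.pyGetD units i (0, 0)).2]
      from by funext d i; rw [if_neg (by decide), if_pos rfl]]
  rw [PySem.List.foldl_append_singleton_eq_map]
  simpa using calcA_eq Prod.snd units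

lemma calc_other (units : List (Int × Int)) (direction : String)
    (hx : direction ≠ "x") (hy : direction ≠ "y") :
    calculate_physical_distances units direction = [] := by
  unfold calculate_physical_distances
  simp only [if_neg hx, if_neg hy]
  exact foldl_const _ _

lemma pick_zero : pick 0 = Prod.fst := by funext u; simp [pick]

lemma pick_one : pick 1 = Prod.snd := by funext u; simp [pick]

-- ===== VERDICT (by name: the statement is the Claim_ definition above) =====
theorem calculate_physical_distances_spec : Claim_equal_calculate_physical_distances := by
  intro units direction _
  unfold Spec_calculate_physical_distances calculate_physical_distances_alt
  by_cases hx : direction = "x"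
  · subst hx
    rw [if_pos rfl, calc_x, diffsDc_eq 0 units.length units rfl, pick_zero]
  · by_cases hy : direction = "y"
    · subst hy
      rw [if_neg hx, if_pos rfl, calc_y, diffsDc_eq 1 units.length units rfl, pick_one]
    · rw [if_neg hx, if_neg hy, calc_other units direction hx hy]
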